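-- pv_equiv track=rewrite | github.com/welikeheon/little-by-little | (100) Programmers/Level2/parentheses_change.py | div_loc
-- ===== SOURCE A (Python) =====
-- def div_loc(p):
--     cnt = 0
--     pvt = p[0]
--     pvts = 0
--     for i in range(len(p)):
--         if p[i] == pvt:
--             pvts += 1
--         else:
--             pvts -= 1
--         cnt += 1
--         if pvts == 0:
--             break
--
--     return cnt
-- ===== SOURCE B (Python) =====
-- def div_loc(p):
--     pvt = p[0]  # IndexError on empty input, as in the original
--     n = len(p)
--     for L in range(1, n + 1):
--         # split of length L is balanced iff pivot chars make up exactly half of it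
--         if 2 * p[:L].count(pvt) == L:
--             return L
--     return n
-- ===== Notes on version B (the rewrite author's own statement) =====
-- stated objective: alternative
-- what changed: Replaced the fused running-balance loop by a candidate test: for each prefix length L (1..n) re-count the pivot char in p[:L] with str.count and return the first L where pivots are exactly half the prefix, falling back to n; equal counts characterise a zero balance, so the first such L is A's answer.
import Mathlib
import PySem

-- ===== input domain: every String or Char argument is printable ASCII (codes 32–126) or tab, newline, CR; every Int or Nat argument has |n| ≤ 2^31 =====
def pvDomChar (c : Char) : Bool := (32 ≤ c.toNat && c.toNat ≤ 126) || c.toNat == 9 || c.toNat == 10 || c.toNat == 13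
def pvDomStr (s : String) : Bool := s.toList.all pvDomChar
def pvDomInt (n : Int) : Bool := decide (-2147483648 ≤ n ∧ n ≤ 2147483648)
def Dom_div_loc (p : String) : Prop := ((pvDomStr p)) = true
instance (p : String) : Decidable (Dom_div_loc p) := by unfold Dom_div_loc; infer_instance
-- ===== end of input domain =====

-- B replaces A's fused running-balance loop by a candidate test over prefix lengths:
-- re-count the pivot char in each prefix and return the first length where it is exactly half.

-- ===== PORT A =====
-- The for-loop over range(len(p)) with the 'break', carrying pvts and cnt.
def divLocLoop (cs : List Char) (pvt : Char) (pvts cnt : Int) : Int :=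
  match cs with
  | [] => cnt
  | c :: rest =>
    let pvts' := if c == pvt then pvts + 1 else pvts - 1
    let cnt' := cnt + 1
    if pvts' = 0 then cnt' else divLocLoop rest pvt pvts' cnt'

def div_loc (p : String) : Int :=
  match p.toList with
  | [] => 0  -- Python raises IndexError at p[0]; excluded by Pre_div_loc
  | pvt :: _ => divLocLoop p.toList pvt 0 0

-- ===== PORT B =====
-- 'for L in range(1, n+1): if 2*p[:L].count(pvt) == L: return L' / 'return n'
def bLoop (cs : List Char) (pvt : Char) (ls : List Nat) : Int :=
  match ls with
  | [] => (cs.length : Int)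
  | L :: rest =>
    if 2 * ((cs.take L).count pvt) = L then (L : Int) else bLoop cs pvt rest

def div_loc_alt (p : String) : Int :=
  match p.toList with
  | [] => 0  -- Python raises IndexError at p[0]; excluded by Pre_div_loc
  | _pvt :: _ => bLoop p.toList _pvt (List.range' 1 p.toList.length)

-- ===== PRECONDITION & SPEC =====
-- Pre_ excludes only the empty string, on which A raises IndexError at p[0].
def Pre_div_loc (p : String) : Prop := p ≠ ""
instance (p : String) : Decidable (Pre_div_loc p) := by unfold Pre_div_loc; infer_instance
def pvWitness_div_loc : String := "(())"

def Spec_div_loc (p : String) (out : Int) : Prop := out = div_loc_alt p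
instance (p : String) (out : Int) : Decidable (Spec_div_loc p out) := by unfold Spec_div_loc; infer_instance

-- ===== CLAIM (what is proved, stated in full; the proofs are below) =====
def Claim_equal_div_loc : Prop := ∀ (p : String), Dom_div_loc p → Pre_div_loc p → Spec_div_loc p (div_loc p)

-- ===== LEMMAS AND PROOFS =====

-- Invariant: after j steps A's loop carries pvts = 2*count(pvt, take j) - j and cnt = j;
-- from there it equals B's scan over the remaining candidate lengths j+1 .. n.
theorem loop_corresp (cs : List Char) (pvt : Char) (k : Nat) :
    ∀ j, cs.length - j = k → j ≤ cs.length →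
      divLocLoop (cs.drop j) pvt (2 * ((cs.take j).count pvt : Int) - j) (j : Int) =
        bLoop cs pvt (List.range' (j + 1) (cs.length - j)) := by
  induction k with
  | zero =>
    intro j hk hle
    have hj : j = cs.length := by omega
    subst hj
    simp [divLocLoop, bLoop, List.drop_length]
  | succ k ih =>
    intro j hk hle
    have hjlt : j < cs.length := by omega
    have hdrop : cs.drop j = cs[j] :: cs.drop (j + 1) :=
      List.drop_eq_getElem_cons hjlt
    have htake : cs.take (j + 1) = cs.take j ++ [cs[j]] :=
      List.take_succ_eq_append_getElem hjlt
    have hrange : List.range' (j + 1) (cs.length - j) =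
        (j + 1) :: List.range' (j + 2) (cs.length - (j + 1)) := by
      have : cs.length - j = (cs.length - (j + 1)) + 1 := by omega
      rw [this, List.range'_succ]
    rw [hdrop, hrange]
    simp only [divLocLoop, bLoop]
    have hcnt : ((cs.take (j + 1)).count pvt : Int) =
        ((cs.take j).count pvt : Int) + (if cs[j] == pvt then 1 else 0) := by
      rw [htake, List.count_append]
      by_cases h : cs[j] = pvt
      · simp [h]
      · simp [h]
    by_cases hc : cs[j] = pvt
    · -- pivot char: balance goes up by 1
      have hstep : (2 * ((cs.take j).count pvt : Int) - j) + 1 =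
          2 * ((cs.take (j+1)).count pvt : Int) - (j + 1) := by
        rw [hcnt]; simp [hc]; ring
      simp only [hc, beq_self_eq_true, if_true]
      by_cases hz : 2 * ((cs.take (j+1)).count pvt) = j + 1
      · have : (2 * ((cs.take j).count pvt : Int) - j) + 1 = 0 := by
          rw [hstep]; omega
        simp [this, hz]
      · have hz' : (2 * ((cs.take j).count pvt : Int) - j) + 1 ≠ 0 := by
          rw [hstep]; intro h; apply hz; omega
        rw [if_neg hz', if_neg hz, hstep]
        have := ih (j + 1) (by omega) (by omega)
        push_cast at this
        exact this
    · -- non-pivot char: balance goes down by 1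
      have hstep : (2 * ((cs.take j).count pvt : Int) - j) - 1 =
          2 * ((cs.take (j+1)).count pvt : Int) - (j + 1) := by
        rw [hcnt]; simp [hc]; ring
      have hbc : (cs[j] == pvt) = false := by simp [hc]
      simp only [hbc, Bool.false_eq_true, if_false]
      by_cases hz : 2 * ((cs.take (j+1)).count pvt) = j + 1
      · have : (2 * ((cs.take j).count pvt : Int) - j) - 1 = 0 := by
          rw [hstep]; omega
        simp [this, hz]
      · have hz' : (2 * ((cs.take j).count pvt : Int) - j) - 1 ≠ 0 := by
          rw [hstep]; intro h; apply hz; omega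
        rw [if_neg hz', if_neg hz, hstep]
        have := ih (j + 1) (by omega) (by omega)
        push_cast at this
        exact this

-- ===== VERDICT (by name: the statement is the Claim_ definition above) =====
theorem div_loc_spec : Claim_equal_div_loc := by
  intro p _ hpre
  unfold Spec_div_loc div_loc div_loc_alt
  cases hl : p.toList with
  | nil =>
    exfalso
    exact hpre (by rwa [String.toList_eq_nil_iff] at hl)
  | cons pvt rest =>
    dsimp only
    have := loop_corresp (pvt :: rest) pvt (pvt :: rest).length 0 (by omega) (by omega)
    simpa using this
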